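-- pv_equiv track=rewrite | github.com/sparklebs3029-sudo/naver-seo-optimizer | naver_seo_agent.py | build_guide_name
-- ===== SOURCE A (Python) =====
-- def build_guide_name(core_keywords: list[str], aux_words: list[str]) -> str:
--     """핵심 키워드 사이에 보조 단어를 삽입해 역순 조합 구조의 상품명을 만든다.
--
--     보조 단어를 최대한 포함하면서 50자 이하가 되도록 뒤쪽 보조 단어부터 제거한다.
--     """
--     for num_aux in range(len(aux_words), -1, -1):
--         parts: list[str] = []
--         for i, core in enumerate(core_keywords):
--             parts.append(core)
--             if i < num_aux and i < len(aux_words) and aux_words[i]: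
--                 parts.append(aux_words[i])
--         name = " ".join(parts).strip()
--         if len(name) <= 50:
--             return name
--     name = " ".join(core_keywords)
--     return name[:50].rsplit(" ", 1)[0] if len(name) > 50 else name
-- ===== SOURCE B (Python) =====
-- def build_guide_name(core_keywords: list[str], aux_words: list[str]) -> str:
--     """Binary search for the largest number of aux words whose name fits in 50
--     chars, instead of rebuilding the name for every count from the top down."""
--     def make(k: int) -> str:
--         words = [w for i, core in enumerate(core_keywords)
--                  for w in ((core, aux_words[i])
--                            if i < k and i < len(aux_words) and aux_words[i]
--                            else (core,))]
--         return " ".join(words).strip()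
--
--     if len(make(0)) > 50:
--         cut = " ".join(core_keywords)[:50]
--         return cut.rsplit(" ", 1)[0]
--     lo, hi = 0, len(aux_words)
--     while lo < hi:
--         mid = (lo + hi + 1) // 2
--         if len(make(mid)) <= 50:
--             lo = mid
--         else:
--             hi = mid - 1
--     return make(lo)
-- ===== Notes on version B (the rewrite author's own statement) =====
-- stated objective: faster
-- what changed: A rebuilds and re-measures the full name for every aux-word count from len(aux_words) down to 0; B checks the zero-aux name once and then binary-searches (using the provable monotonicity of the stripped name length in the aux count) for the largest count that keeps the name within 50 characters, building O(log A) candidate names instead of O(A).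
import Mathlib
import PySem

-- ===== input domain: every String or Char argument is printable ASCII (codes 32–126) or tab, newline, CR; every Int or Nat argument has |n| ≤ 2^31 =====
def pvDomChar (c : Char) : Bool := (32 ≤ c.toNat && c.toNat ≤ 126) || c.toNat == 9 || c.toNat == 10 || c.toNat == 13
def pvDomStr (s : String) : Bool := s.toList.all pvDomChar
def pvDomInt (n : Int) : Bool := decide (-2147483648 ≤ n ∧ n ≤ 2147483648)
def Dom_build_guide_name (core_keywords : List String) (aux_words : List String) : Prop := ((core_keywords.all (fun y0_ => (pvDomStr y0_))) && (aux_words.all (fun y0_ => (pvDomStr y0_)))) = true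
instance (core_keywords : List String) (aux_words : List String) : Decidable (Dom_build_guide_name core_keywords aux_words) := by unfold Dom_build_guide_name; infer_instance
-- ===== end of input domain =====

-- B replaces A's top-down linear scan over every aux-word count by a binary search for the
-- largest count whose name still fits in 50 characters (objective: faster on long inputs).

-- shared sub-expression of both Pythons: name[:50].rsplit(" ", 1)[0]
-- hand port of rsplit(" ", 1)[0]: everything before the LAST ' ' of the first 50 chars,
-- or those 50 chars unchanged when they contain no ' ' (exact: rsplit with maxsplit=1
-- splits at the last occurrence only).
def pvCut50 (name : String) : String :=
  let cut := PySem.Str.slice name none (some 50)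
  let j := PySem.Str.rfind cut " "
  if j = -1 then cut else PySem.Str.slice cut none (some j)

-- ===== PORT A =====
-- inner loop of A: parts built by appending core, then conditionally the aux word
def pvPartsA (core_keywords aux_words : List String) (num_aux : Int) : List String :=
  (PySem.List.enumerate core_keywords 0).foldl
    (fun parts ic =>
      let parts := parts ++ [ic.2]
      if ic.1 < num_aux ∧ ic.1 < (aux_words.length : Int) ∧ PySem.List.pyGetD aux_words ic.1 "" ≠ "" then
        parts ++ [PySem.List.pyGetD aux_words ic.1 ""]
      else parts)
    []

-- outer 'for num_aux in range(len(aux_words), -1, -1)' with early return; [] = fell through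
def pvLoopA (core_keywords aux_words : List String) : List Int → String
  | [] =>
    let name := PySem.Str.join " " core_keywords
    if 50 < PySem.Str.len name then pvCut50 name else name
  | num_aux :: rest =>
    let name := PySem.Str.strip (PySem.Str.join " " (pvPartsA core_keywords aux_words num_aux))
    if PySem.Str.len name ≤ 50 then name else pvLoopA core_keywords aux_words rest

def build_guide_name (core_keywords : List String) (aux_words : List String) : String :=
  pvLoopA core_keywords aux_words (PySem.List.pyRange (aux_words.length : Int) (-1) (-1))

-- ===== PORT B =====
-- B's make(k): the candidate name using the first k aux words, built by a comprehension
def pvMakeB (core_keywords aux_words : List String) (k : Int) : String :=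
  PySem.Str.strip (PySem.Str.join " "
    ((PySem.List.enumerate core_keywords 0).flatMap (fun ic =>
      if ic.1 < k ∧ ic.1 < (aux_words.length : Int) ∧ PySem.List.pyGetD aux_words ic.1 "" ≠ "" then
        [ic.2, PySem.List.pyGetD aux_words ic.1 ""]
      else [ic.2])))

-- B's 'while lo < hi' binary search; fuel = initial hi - lo bounds the iteration count
-- (Nat '/' coincides with Python '//' on the nonnegative lo, hi)
def pvSearchB (core_keywords aux_words : List String) : Nat → Nat → Nat → Nat
  | lo, _, 0 => lo
  | lo, hi, fuel+1 =>
    if lo < hi then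
      let mid := (lo + hi + 1) / 2
      if PySem.Str.len (pvMakeB core_keywords aux_words (mid : Int)) ≤ 50 then
        pvSearchB core_keywords aux_words mid hi fuel
      else
        pvSearchB core_keywords aux_words lo (mid - 1) fuel
    else lo

def build_guide_name_alt (core_keywords : List String) (aux_words : List String) : String :=
  if 50 < PySem.Str.len (pvMakeB core_keywords aux_words 0) then
    pvCut50 (PySem.Str.join " " core_keywords)
  else
    pvMakeB core_keywords aux_words
      ((pvSearchB core_keywords aux_words 0 aux_words.length aux_words.length : Nat) : Int)

-- ===== PRECONDITION & SPEC =====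
def Spec_build_guide_name (core_keywords : List String) (aux_words : List String) (out : String) : Prop := out = build_guide_name_alt core_keywords aux_words
instance (core_keywords : List String) (aux_words : List String) (out : String) : Decidable (Spec_build_guide_name core_keywords aux_words out) := by unfold Spec_build_guide_name; infer_instance

-- ===== CLAIM (what is proved, stated in full; the proofs are below) =====
def Claim_equal_build_guide_name : Prop := ∀ (core_keywords : List String) (aux_words : List String), Dom_build_guide_name core_keywords aux_words → Spec_build_guide_name core_keywords aux_words (build_guide_name core_keywords aux_words)

-- ===== LEMMAS AND PROOFS =====

-- the per-element contribution both ports build the parts list from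
def pvG (aux_words : List String) (k : Int) (ic : Int × String) : List String :=
  if ic.1 < k ∧ ic.1 < (aux_words.length : Int) ∧ PySem.List.pyGetD aux_words ic.1 "" ≠ "" then
    [ic.2, PySem.List.pyGetD aux_words ic.1 ""]
  else [ic.2]

def pvParts (core_keywords aux_words : List String) (k : Int) : List String :=
  (PySem.List.enumerate core_keywords 0).flatMap (pvG aux_words k)

-- the candidate name at aux-word count k, as a char list
def pvName (core_keywords aux_words : List String) (k : Int) : List Char :=
  PySem.Chars.strip (PySem.Chars.join [' '] ((pvParts core_keywords aux_words k).map String.toList))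

def pvL (core_keywords aux_words : List String) (k : Nat) : Nat :=
  (pvName core_keywords aux_words (k : Int)).length

theorem pv_partsA_eq (core_keywords aux_words : List String) (k : Int) :
    pvPartsA core_keywords aux_words k = pvParts core_keywords aux_words k := by
  unfold pvPartsA pvParts
  have hfun : (fun (parts : List String) (ic : Int × String) =>
      let parts := parts ++ [ic.2]
      if ic.1 < k ∧ ic.1 < (aux_words.length : Int) ∧ PySem.List.pyGetD aux_words ic.1 "" ≠ "" then
        parts ++ [PySem.List.pyGetD aux_words ic.1 ""]
      else parts)
      = fun parts ic => parts ++ pvG aux_words k ic := by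
    funext parts ic
    by_cases h : ic.1 < k ∧ ic.1 < (aux_words.length : Int) ∧ PySem.List.pyGetD aux_words ic.1 "" ≠ ""
    · simp [pvG, h]
    · simp [pvG, h]
  rw [hfun, PySem.List.foldl_append_eq_flatMap]
  simp

theorem pv_makeB_toList (core_keywords aux_words : List String) (k : Int) :
    (pvMakeB core_keywords aux_words k).toList = pvName core_keywords aux_words k := by
  unfold pvMakeB pvName pvParts pvG
  rw [PySem.Str.toList_strip, PySem.Str.toList_join]
  have hsp : (" ":String).toList = [' '] := by decide
  rw [hsp]


theorem pv_lenB (core_keywords aux_words : List String) (k : Nat) :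
    PySem.Str.len (pvMakeB core_keywords aux_words (k : Int)) = (pvL core_keywords aux_words k : Int) := by
  rw [PySem.Str.len_eq, pv_makeB_toList]
  rfl

theorem pv_dl_prepend (p : Char → Bool) (y z : List Char) :
    (z.dropWhile p).length ≤ ((y ++ z).dropWhile p).length := by
  induction y with
  | nil => simp
  | cons c y' ih =>
    by_cases hc : p c
    · simpa [hc] using ih
    · have h1 := List.length_dropWhile_le p z
      simp [hc]
      omega

theorem pv_dl_ins (p : Char → Bool) (x y z : List Char) :
    ((x ++ z).dropWhile p).length ≤ ((x ++ y ++ z).dropWhile p).length := by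
  induction x with
  | nil => simpa using pv_dl_prepend p y z
  | cons c x' ih =>
    by_cases hc : p c
    · simpa [hc] using ih
    · simp [hc]

theorem pv_sl_ins (x y z : List Char) :
    (PySem.Chars.strip (x ++ z)).length ≤ (PySem.Chars.strip (x ++ y ++ z)).length := by
  simp only [PySem.Chars.strip, PySem.Chars.lstrip, PySem.Chars.rstrip, List.length_reverse]
  set p := PySem.Chars.isspace with hp
  have hassoc : x ++ y ++ z = x ++ (y ++ z) := by simp
  by_cases hx : (x.dropWhile p).isEmpty
  · have h1 : (x ++ z).dropWhile p = z.dropWhile p := by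
      rw [List.dropWhile_append, if_pos hx]
    have h2 : (x ++ y ++ z).dropWhile p = (y ++ z).dropWhile p := by
      rw [hassoc, List.dropWhile_append, if_pos hx]
    rw [h1, h2]
    by_cases hy : (y.dropWhile p).isEmpty
    · rw [List.dropWhile_append, if_pos hy]
    · rw [List.dropWhile_append, if_neg hy]
      have hsplit : z = z.takeWhile p ++ z.dropWhile p := (List.takeWhile_append_dropWhile).symm
      have heq : (y.dropWhile p ++ z).reverse
          = (z.dropWhile p).reverse ++ ((z.takeWhile p).reverse ++ (y.dropWhile p).reverse) := by
        conv_lhs => rw [hsplit]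
        rw [List.reverse_append, List.reverse_append]
        simp only [List.append_assoc]
      rw [heq]
      simpa using pv_dl_ins p (z.dropWhile p).reverse ((z.takeWhile p).reverse ++ (y.dropWhile p).reverse) []
  · have h1 : (x ++ z).dropWhile p = x.dropWhile p ++ z := by
      rw [List.dropWhile_append, if_neg hx]
    have h2 : (x ++ y ++ z).dropWhile p = x.dropWhile p ++ (y ++ z) := by
      rw [hassoc, List.dropWhile_append, if_neg hx]
    rw [h1, h2]
    have e1 : (x.dropWhile p ++ z).reverse = z.reverse ++ (x.dropWhile p).reverse := by simp
    have e2 : (x.dropWhile p ++ (y ++ z)).reverse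
        = z.reverse ++ y.reverse ++ (x.dropWhile p).reverse := by simp
    rw [e1, e2]
    exact pv_dl_ins p z.reverse y.reverse (x.dropWhile p).reverse

theorem pv_sl_le (s : List Char) : (PySem.Chars.strip s).length ≤ s.length := by
  simp only [PySem.Chars.strip, PySem.Chars.lstrip, PySem.Chars.rstrip, List.length_reverse]
  calc ((s.dropWhile PySem.Chars.isspace).reverse.dropWhile PySem.Chars.isspace).length
      ≤ (s.dropWhile PySem.Chars.isspace).reverse.length := List.length_dropWhile_le _ _
    _ ≤ s.length := by simpa using List.length_dropWhile_le PySem.Chars.isspace s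

theorem pv_join_append (sep : List Char) (P Q : List (List Char)) (hP : P ≠ []) (hQ : Q ≠ []) :
    PySem.Chars.join sep (P ++ Q) = PySem.Chars.join sep P ++ sep ++ PySem.Chars.join sep Q := by
  induction P with
  | nil => exact absurd rfl hP
  | cons p P' ih =>
    cases P' with
    | nil =>
      cases Q with
      | nil => exact absurd rfl hQ
      | cons q Q' =>
        rw [List.singleton_append, PySem.Chars.join_cons_cons, PySem.Chars.join_singleton]
    | cons p2 P'' =>
      have h := ih (by simp)
      rw [show (p :: p2 :: P'') ++ Q = p :: ((p2 :: P'') ++ Q) by simp,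
          show (p2 :: P'') ++ Q = p2 :: (P'' ++ Q) by simp]
      rw [PySem.Chars.join_cons_cons, show p2 :: (P'' ++ Q) = (p2 :: P'') ++ Q by simp, h,
          PySem.Chars.join_cons_cons]
      simp [List.append_assoc]

theorem pv_mono_step (core_keywords aux_words : List String) (k : Nat) :
    pvL core_keywords aux_words k ≤ pvL core_keywords aux_words (k+1) := by
  have hcast : ((k+1 : Nat) : Int) = (k : Int) + 1 := by push_cast; ring
  by_cases hC : k < core_keywords.length ∧ (k : Int) < (aux_words.length : Int) ∧
      PySem.List.pyGetD aux_words (k : Int) "" ≠ ""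
  · obtain ⟨hk, hk2, hk3⟩ := hC
    have hsplit : core_keywords
        = core_keywords.take k ++ core_keywords[k] :: core_keywords.drop (k+1) := by
      rw [← List.drop_eq_getElem_cons hk, List.take_append_drop]
    have hlen : (core_keywords.take k).length = k := by simp [List.length_take]; omega
    have hE : PySem.List.enumerate core_keywords 0
        = PySem.List.enumerate (core_keywords.take k) 0
          ++ ((k : Int), core_keywords[k]) :: PySem.List.enumerate (core_keywords.drop (k+1)) ((k : Int) + 1) := by
      conv_lhs => rw [hsplit]
      rw [PySem.List.enumerate_append, PySem.List.enumerate_cons, hlen]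
      norm_num
    have hparts : ∀ (m : Int), pvParts core_keywords aux_words m
        = (PySem.List.enumerate (core_keywords.take k) 0).flatMap (pvG aux_words m)
          ++ pvG aux_words m ((k : Int), core_keywords[k])
          ++ (PySem.List.enumerate (core_keywords.drop (k+1)) ((k : Int) + 1)).flatMap (pvG aux_words m) := by
      intro m
      rw [pvParts, hE, List.flatMap_append, List.flatMap_cons]
      simp [List.append_assoc]
    have hF1 : (PySem.List.enumerate (core_keywords.take k) 0).flatMap (pvG aux_words (k : Int))
        = (PySem.List.enumerate (core_keywords.take k) 0).flatMap (pvG aux_words ((k : Int) + 1)) := by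
      apply List.flatMap_congr
      intro ic hic
      rw [PySem.List.mem_enumerate_iff] at hic
      obtain ⟨j, hj, rfl⟩ := hic
      have hjk : j < k := by rw [hlen] at hj; exact hj
      simp [pvG, hjk, Nat.le_of_lt hjk]
    have hF2' : (PySem.List.enumerate (core_keywords.drop (k+1)) ((k : Int) + 1)).flatMap (pvG aux_words (k : Int))
        = (PySem.List.enumerate (core_keywords.drop (k+1)) ((k : Int) + 1)).flatMap (pvG aux_words ((k : Int) + 1)) := by
      apply List.flatMap_congr
      intro ic hic
      rw [PySem.List.mem_enumerate_iff] at hic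
      obtain ⟨j, hj, rfl⟩ := hic
      simp only [pvG]
      have h1 : ¬ ((k : Int) + 1 + (j : Int) < (k : Int)) := by omega
      have h2 : ¬ ((k : Int) + 1 + (j : Int) < (k : Int) + 1) := by omega
      simp [h1, h2]
    have hmidk : pvG aux_words (k : Int) ((k : Int), core_keywords[k]) = [core_keywords[k]] := by
      simp [pvG]
    have hmidk1 : pvG aux_words ((k : Int) + 1) ((k : Int), core_keywords[k])
        = [core_keywords[k], PySem.List.pyGetD aux_words (k : Int) ""] := by
      simp only [pvG]
      rw [if_pos ⟨by omega, hk2, hk3⟩]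
    have hmapk : (pvParts core_keywords aux_words (k : Int)).map String.toList
        = (((PySem.List.enumerate (core_keywords.take k) 0).flatMap (pvG aux_words (k : Int))).map String.toList
            ++ [core_keywords[k].toList])
          ++ ((PySem.List.enumerate (core_keywords.drop (k+1)) ((k : Int) + 1)).flatMap (pvG aux_words (k : Int))).map String.toList := by
      rw [hparts, hmidk]
      simp [List.append_assoc]
    have hmapk1 : (pvParts core_keywords aux_words ((k : Int) + 1)).map String.toList
        = (((PySem.List.enumerate (core_keywords.take k) 0).flatMap (pvG aux_words (k : Int))).map String.toList
            ++ [core_keywords[k].toList])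
          ++ ([(PySem.List.pyGetD aux_words (k : Int) "").toList]
            ++ ((PySem.List.enumerate (core_keywords.drop (k+1)) ((k : Int) + 1)).flatMap (pvG aux_words (k : Int))).map String.toList) := by
      rw [hparts, hmidk1, ← hF1, ← hF2']
      simp [List.append_assoc]
    unfold pvL pvName
    rw [hcast, hmapk, hmapk1]
    generalize ((PySem.List.enumerate (core_keywords.drop (k+1)) ((k : Int) + 1)).flatMap (pvG aux_words (k : Int))).map String.toList = F2
    generalize ((PySem.List.enumerate (core_keywords.take k) 0).flatMap (pvG aux_words (k : Int))).map String.toList = F1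
    have hQ0 : (F1 ++ [core_keywords[k].toList]) ≠ [] := by simp
    rcases F2 with _ | ⟨m, mt⟩
    · simp only [List.append_nil]
      rw [pv_join_append [' '] (F1 ++ [core_keywords[k].toList])
            [(PySem.List.pyGetD aux_words (k : Int) "").toList] hQ0 (by simp),
          PySem.Chars.join_singleton]
      simpa [List.append_assoc] using
        pv_sl_ins (PySem.Chars.join [' '] (F1 ++ [core_keywords[k].toList]))
          ([' '] ++ (PySem.List.pyGetD aux_words (k : Int) "").toList) []
    · rw [pv_join_append [' '] (F1 ++ [core_keywords[k].toList]) (m :: mt) hQ0 (by simp)]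
      rw [pv_join_append [' '] (F1 ++ [core_keywords[k].toList])
            ([(PySem.List.pyGetD aux_words (k : Int) "").toList] ++ m :: mt) hQ0 (by simp)]
      rw [show ([(PySem.List.pyGetD aux_words (k : Int) "").toList] ++ m :: mt)
            = (PySem.List.pyGetD aux_words (k : Int) "").toList :: m :: mt by simp,
          PySem.Chars.join_cons_cons]
      simpa [List.append_assoc] using
        pv_sl_ins (PySem.Chars.join [' '] (F1 ++ [core_keywords[k].toList]) ++ [' '])
          ((PySem.List.pyGetD aux_words (k : Int) "").toList ++ [' '])
          (PySem.Chars.join [' '] (m :: mt))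
  · have heq : pvParts core_keywords aux_words (k : Int) = pvParts core_keywords aux_words ((k : Int) + 1) := by
      apply List.flatMap_congr
      intro ic hic
      rw [PySem.List.mem_enumerate_iff] at hic
      obtain ⟨j, hj, rfl⟩ := hic
      simp only [pvG]
      by_cases hjk : j = k
      · subst hjk
        have h1 : ¬ ((0 : Int) + (j : Int) < (j : Int)) := by omega
        rw [if_neg (by intro h; exact h1 h.1)]
        rw [if_neg (by
          intro h
          exact hC ⟨hj, by simpa using h.2.1, by simpa using h.2.2⟩)]
      · have hiff : ((0 : Int) + (j : Int) < (k : Int)) ↔ ((0 : Int) + (j : Int) < (k : Int) + 1) := by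
          constructor
          · intro h; omega
          · intro h; have : j ≠ k := hjk; omega
        by_cases h : (0 : Int) + (j : Int) < (k : Int) ∧ (0 : Int) + (j : Int) < (aux_words.length : Int) ∧
            PySem.List.pyGetD aux_words ((0 : Int) + (j : Int)) "" ≠ ""
        · rw [if_pos h, if_pos ⟨hiff.1 h.1, h.2⟩]
        · rw [if_neg h, if_neg (by intro h'; exact h ⟨hiff.2 h'.1, h'.2⟩)]
    unfold pvL pvName
    rw [hcast, heq]

theorem pv_nameA_eq (core_keywords aux_words : List String) (k : Int) :
    PySem.Str.strip (PySem.Str.join " " (pvPartsA core_keywords aux_words k))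
      = pvMakeB core_keywords aux_words k := by
  rw [pv_partsA_eq]
  rfl

theorem pv_mono (core_keywords aux_words : List String) {a b : Nat} (h : a ≤ b) :
    pvL core_keywords aux_words a ≤ pvL core_keywords aux_words b := by
  induction b with
  | zero => simp [Nat.le_zero.mp h]
  | succ b ih =>
    rcases Nat.lt_or_ge a (b+1) with hlt | hge
    · exact le_trans (ih (by omega)) (pv_mono_step core_keywords aux_words b)
    · have : a = b + 1 := by omega
      subst this; exact le_refl _

def pvDesc (m : Nat) : List Int := (List.range (m+1)).map (fun (k : Nat) => (m : Int) - (k : Int))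

theorem pv_range_countdown (m : Nat) :
    PySem.List.pyRange (m : Int) (-1) (-1) = pvDesc m := by
  unfold PySem.List.pyRange pvDesc
  rw [if_neg (by norm_num)]
  have hlt : (-1 : Int) < (m : Int) := by omega
  simp only [show ¬ ((0:Int) < -1) by norm_num, if_false, if_pos hlt]
  have hcount : (((m : Int) - (-1) + (-(-1)) - 1) / (-(-1))).toNat = m + 1 := by
    norm_num
  rw [hcount]
  apply List.map_congr_left
  intro a _
  ring

theorem pv_desc_succ (m : Nat) : pvDesc (m+1) = ((m+1 : Nat) : Int) :: pvDesc m := by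
  unfold pvDesc
  rw [List.range_succ_eq_map]
  simp only [List.map_cons, List.map_map, Function.comp_def]
  congr 1
  apply List.map_congr_left
  intro a _
  push_cast
  ring

theorem pv_desc_zero : pvDesc 0 = [0] := by unfold pvDesc; decide

theorem pv_loopA_eq (core_keywords aux_words : List String) (m r : Nat) (hr : r ≤ m)
    (h50 : pvL core_keywords aux_words r ≤ 50)
    (hb : ∀ j, r < j → j ≤ m → 50 < pvL core_keywords aux_words j) :
    pvLoopA core_keywords aux_words (pvDesc m) = pvMakeB core_keywords aux_words (r : Int) := by
  induction m with
  | zero =>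
    have hr0 : r = 0 := Nat.le_zero.mp hr
    subst hr0
    rw [pv_desc_zero]
    simp only [pvLoopA]
    rw [show (0 : Int) = ((0 : Nat) : Int) by norm_num, pv_nameA_eq, pv_lenB]
    rw [if_pos (by exact_mod_cast h50)]
  | succ m ih =>
    rw [pv_desc_succ]
    simp only [pvLoopA]
    rw [pv_nameA_eq, pv_lenB]
    rcases Nat.lt_or_ge r (m+1) with hlt | hge
    · rw [if_neg (by
        have := hb (m+1) (by omega) (by omega)
        intro hcon
        have : (50 : Int) < (pvL core_keywords aux_words (m+1) : Int) := by exact_mod_cast this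
        omega)]
      exact ih (by omega) (fun j hj1 hj2 => hb j hj1 (by omega))
    · have hreq : r = m + 1 := by omega
      subst hreq
      rw [if_pos (by exact_mod_cast h50)]

theorem pv_loopA_none (core_keywords aux_words : List String) (m : Nat)
    (h : ∀ j, j ≤ m → 50 < pvL core_keywords aux_words j) :
    pvLoopA core_keywords aux_words (pvDesc m) = pvLoopA core_keywords aux_words [] := by
  induction m with
  | zero =>
    rw [pv_desc_zero]
    simp only [pvLoopA]
    rw [show (0 : Int) = ((0 : Nat) : Int) by norm_num, pv_nameA_eq, pv_lenB]
    rw [if_neg (by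
      have := h 0 (by omega)
      intro hcon
      have h' : (50 : Int) < (pvL core_keywords aux_words 0 : Int) := by exact_mod_cast this
      omega)]
  | succ m ih =>
    rw [pv_desc_succ]
    simp only [pvLoopA]
    rw [pv_nameA_eq, pv_lenB]
    rw [if_neg (by
      have := h (m+1) (by omega)
      intro hcon
      have h' : (50 : Int) < (pvL core_keywords aux_words (m+1) : Int) := by exact_mod_cast this
      omega)]
    exact ih (fun j hj => h j (by omega))

theorem pv_search_spec (core_keywords aux_words : List String) (fuel : Nat) :
    ∀ lo hi : Nat, lo ≤ hi → hi ≤ aux_words.length → hi - lo ≤ fuel →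
    pvL core_keywords aux_words lo ≤ 50 →
    (∀ j, hi < j → j ≤ aux_words.length → 50 < pvL core_keywords aux_words j) →
    (pvL core_keywords aux_words (pvSearchB core_keywords aux_words lo hi fuel) ≤ 50 ∧
     pvSearchB core_keywords aux_words lo hi fuel ≤ aux_words.length ∧
     (∀ j, pvSearchB core_keywords aux_words lo hi fuel < j → j ≤ aux_words.length →
        50 < pvL core_keywords aux_words j)) := by
  induction fuel with
  | zero =>
    intro lo hi hlh hhA hf hlo hhb
    have : hi = lo := by omega
    subst this
    simp only [pvSearchB]
    exact ⟨hlo, by omega, fun j hj1 hj2 => hhb j hj1 hj2⟩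
  | succ fuel ih =>
    intro lo hi hlh hhA hf hlo hhb
    simp only [pvSearchB]
    by_cases hlt : lo < hi
    · rw [if_pos hlt]
      have hmid1 : lo < (lo + hi + 1) / 2 := by omega
      have hmid2 : (lo + hi + 1) / 2 ≤ hi := by omega
      by_cases hc : PySem.Str.len (pvMakeB core_keywords aux_words (((lo + hi + 1) / 2 : Nat) : Int)) ≤ 50
      · rw [if_pos hc]
        have hcnat : pvL core_keywords aux_words ((lo + hi + 1) / 2) ≤ 50 := by
          rw [pv_lenB] at hc; exact_mod_cast hc
        exact ih ((lo + hi + 1) / 2) hi hmid2 hhA (by omega) hcnat hhb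
      · rw [if_neg hc]
        have hcnat : 50 < pvL core_keywords aux_words ((lo + hi + 1) / 2) := by
          rw [pv_lenB] at hc; omega
        refine ih lo ((lo + hi + 1) / 2 - 1) (by omega) (by omega) (by omega) hlo ?_
        intro j hj1 hj2
        rcases Nat.lt_or_ge hi j with hcase | hcase
        · exact hhb j hcase hj2
        · exact lt_of_lt_of_le hcnat (pv_mono core_keywords aux_words (by omega))
    · rw [if_neg hlt]
      have : hi = lo := by omega
      subst this
      exact ⟨hlo, by omega, fun j hj1 hj2 => hhb j hj1 hj2⟩

theorem pv_parts_zero (core_keywords aux_words : List String) :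
    pvParts core_keywords aux_words 0 = core_keywords := by
  unfold pvParts
  have h1 : (PySem.List.enumerate core_keywords 0).flatMap (pvG aux_words 0)
      = (PySem.List.enumerate core_keywords 0).flatMap (fun ic => [ic.2]) := by
    apply List.flatMap_congr
    intro ic hic
    rw [PySem.List.mem_enumerate_iff] at hic
    obtain ⟨j, hj, rfl⟩ := hic
    simp only [pvG]
    rw [if_neg (by intro h; have := h.1; omega)]
  rw [h1]
  have h2 : ∀ (E : List (Int × String)), E.flatMap (fun ic => [ic.2]) = E.map (fun ic => ic.2) := by
    intro E
    induction E with
    | nil => rfl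
    | cons e t ih => simp [List.flatMap_cons, ih]
  rw [h2, PySem.List.map_snd_enumerate]


-- ===== VERDICT (by name: the statement is the Claim_ definition above) =====
theorem build_guide_name_spec : Claim_equal_build_guide_name := by
  intro core_keywords aux_words _
  show build_guide_name core_keywords aux_words = build_guide_name_alt core_keywords aux_words
  unfold build_guide_name build_guide_name_alt
  rw [pv_range_countdown]
  have hlen0 : PySem.Str.len (pvMakeB core_keywords aux_words 0)
      = (pvL core_keywords aux_words 0 : Int) := by
    rw [show (0 : Int) = ((0 : Nat) : Int) by norm_num, pv_lenB]
  by_cases h0 : pvL core_keywords aux_words 0 ≤ 50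
  · rw [if_neg (by rw [hlen0]; intro h; omega)]
    obtain ⟨h1, h2, h3⟩ := pv_search_spec core_keywords aux_words aux_words.length 0 aux_words.length
      (by omega) (le_refl _) (by omega) h0 (fun j hj1 hj2 => absurd hj1 (by omega))
    exact pv_loopA_eq core_keywords aux_words aux_words.length _ h2 h1 h3
  · have hgt : 50 < pvL core_keywords aux_words 0 := by omega
    have hall : ∀ j, j ≤ aux_words.length → 50 < pvL core_keywords aux_words j :=
      fun j _ => lt_of_lt_of_le hgt (pv_mono core_keywords aux_words (Nat.zero_le j))
    rw [pv_loopA_none core_keywords aux_words aux_words.length hall]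
    simp only [pvLoopA]
    have hraw : 50 < PySem.Str.len (PySem.Str.join " " core_keywords) := by
      have hjoin : (PySem.Str.join " " core_keywords).toList
          = PySem.Chars.join [' '] (core_keywords.map String.toList) := by
        rw [PySem.Str.toList_join]
        have hsp : (" " : String).toList = [' '] := by decide
        rw [hsp]
      have hle : pvL core_keywords aux_words 0
          ≤ (PySem.Chars.join [' '] (core_keywords.map String.toList)).length := by
        unfold pvL pvName
        rw [show ((0 : Nat) : Int) = (0 : Int) by norm_num, pv_parts_zero]
        exact pv_sl_le _
      rw [PySem.Str.len_eq, hjoin]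
      have : 50 < (PySem.Chars.join [' '] (core_keywords.map String.toList)).length := by omega
      exact_mod_cast this
    rw [if_pos hraw, if_pos (by rw [hlen0]; exact_mod_cast hgt)]
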